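-- pv_equiv track=rewrite | github.com/cms-sw/cms-bot | comparisons/validateJR.py | file_index
-- ===== SOURCE A (Python) =====
-- def file_index(fileName):
--     ndigits=3
--     fn= fileName.replace('step','').replace('.root','')
--     if '_' in fn : fn,_=fn.split('_',1)
--     while ndigits:
--         index = fn[-ndigits:]
--         if index.isdigit():
--             return int(index)
--         ndigits-=1
--     return None
-- ===== SOURCE B (Python) =====
-- def file_index(fileName):
--     fn = fileName.replace('step', '').replace('.root', '')
--     if '_' in fn:
--         fn, _ = fn.split('_', 1)
--     count = 0
--     for ch in reversed(fn):
--         if count == 3 or not ch.isdigit():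
--             break
--         count += 1
--     return int(fn[-count:]) if count else None
-- ===== Notes on version B (the rewrite author's own statement) =====
-- stated objective: simpler
-- what changed: A tries the fixed suffix lengths 3, 2, 1 in turn, re-slicing and re-testing a whole suffix with str.isdigit each time; B makes one backward pass over the cleaned name counting trailing digit characters (capped at 3) and converts that one suffix.
import Mathlib
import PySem

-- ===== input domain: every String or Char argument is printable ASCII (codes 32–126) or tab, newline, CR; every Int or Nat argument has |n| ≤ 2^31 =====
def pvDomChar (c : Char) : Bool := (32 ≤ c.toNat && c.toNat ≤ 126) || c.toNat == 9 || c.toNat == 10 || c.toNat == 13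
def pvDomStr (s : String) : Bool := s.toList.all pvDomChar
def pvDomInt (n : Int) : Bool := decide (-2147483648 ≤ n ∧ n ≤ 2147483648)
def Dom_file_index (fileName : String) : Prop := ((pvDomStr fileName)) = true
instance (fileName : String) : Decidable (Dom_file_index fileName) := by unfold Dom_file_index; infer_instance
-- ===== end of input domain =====

-- B replaces A's loop that tries the suffix lengths 3, 2, 1 in turn by a single
-- backward pass counting trailing digit characters (capped at 3); objective: simpler.

-- ===== PORT A =====
-- the 'while ndigits:' loop of A; ndigits counts down 3, 2, 1
def fileIndexLoop (fn : List Char) : Nat → Option Int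
  | 0 => none
  | ndigits + 1 =>
    let index := PySem.List.slice fn (some (-((ndigits + 1 : Nat) : Int))) none
    if PySem.Chars.strIsdigit index then PySem.Int.ofChars? index
    else fileIndexLoop fn ndigits

def file_index (fileName : String) : Option Int :=
  let fn := PySem.Str.replace (PySem.Str.replace fileName "step" "") ".root" ""
  let fn := if PySem.Str.isIn "_" fn then
      (match PySem.Str.splitMax? fn "_" 1 with
       | some (h :: _) => h
       | _ => fn)
    else fn
  fileIndexLoop fn.toList 3

-- ===== PORT B =====
-- 'for ch in reversed(fn): if count == 3 or not ch.isdigit(): break; count += 1'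
def trailDigits : List Char → Nat → Nat
  | [], count => count
  | ch :: rest, count =>
    if count == 3 || !(PySem.Chars.isdigit ch) then count
    else trailDigits rest (count + 1)

def file_index_alt (fileName : String) : Option Int :=
  let fn := PySem.Str.replace (PySem.Str.replace fileName "step" "") ".root" ""
  let fn := if PySem.Str.isIn "_" fn then
      (match PySem.Str.splitMax? fn "_" 1 with
       | some (h :: _) => h
       | some [] => fn
       | none => fn)
    else fn
  let count := trailDigits fn.toList.reverse 0
  if count > 0 then
    PySem.Int.ofChars? (PySem.List.slice fn.toList (some (-(count : Int))) none)
  else none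

-- ===== PRECONDITION & SPEC =====
def Spec_file_index (fileName : String) (out : Option Int) : Prop := out = file_index_alt fileName
instance (fileName : String) (out : Option Int) : Decidable (Spec_file_index fileName out) := by unfold Spec_file_index; infer_instance

-- ===== CLAIM (what is proved, stated in full; the proofs are below) =====
def Claim_equal_file_index : Prop := ∀ (fileName : String), Dom_file_index fileName → Spec_file_index fileName (file_index fileName)

-- ===== LEMMAS AND PROOFS =====

-- A's loop, unrolled to its three iterations (ndigits = 3, 2, 1)
theorem loop3 (fn : List Char) :
    fileIndexLoop fn 3 =
      (if PySem.Chars.strIsdigit (PySem.List.slice fn (some (-((3 : Nat) : Int))) none) then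
         PySem.Int.ofChars? (PySem.List.slice fn (some (-((3 : Nat) : Int))) none)
       else if PySem.Chars.strIsdigit (PySem.List.slice fn (some (-((2 : Nat) : Int))) none) then
         PySem.Int.ofChars? (PySem.List.slice fn (some (-((2 : Nat) : Int))) none)
       else if PySem.Chars.strIsdigit (PySem.List.slice fn (some (-((1 : Nat) : Int))) none) then
         PySem.Int.ofChars? (PySem.List.slice fn (some (-((1 : Nat) : Int))) none)
       else none) := rfl

-- once the cap 3 is reached, B's counting loop stops at 3
theorem trail3 (t : List Char) : trailDigits t 3 = 3 := by
  cases t <;> simp [trailDigits]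

-- drop all but the last k elements, seen through an append
theorem drop_sub_append (xs ys : List Char) (k : Nat) (h : k ≤ ys.length) :
    (xs ++ ys).drop ((xs ++ ys).length - k) = ys.drop (ys.length - k) := by
  have hlen : (xs ++ ys).length - k = xs.length + (ys.length - k) := by
    simp [List.length_append]; omega
  rw [hlen, List.drop_append]
  simp

-- the core equivalence, by cases on the reversed cleaned string
theorem loop_eq_count (r : List Char) :
    fileIndexLoop r.reverse 3 =
      (let count := trailDigits r 0
       if count > 0 then
         PySem.Int.ofChars? (PySem.List.slice r.reverse (some (-(count : Int))) none)
       else none) := by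
  match r with
  | [] => decide
  | [a] =>
    have e : ([a] : List Char).reverse = [a] := rfl
    have s3 : PySem.List.slice ([a] : List Char) (some (-((3 : Nat) : Int))) none = [a] := by
      rw [PySem.List.slice_from_neg_natCast _ 3 (by norm_num)]; simp
    have s2 : PySem.List.slice ([a] : List Char) (some (-((2 : Nat) : Int))) none = [a] := by
      rw [PySem.List.slice_from_neg_natCast _ 2 (by norm_num)]; simp
    have s1 : PySem.List.slice ([a] : List Char) (some (-((1 : Nat) : Int))) none = [a] := by
      rw [PySem.List.slice_from_neg_natCast _ 1 (by norm_num)]; simp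
    have s1' : PySem.List.slice ([a] : List Char) (some (-(1 : Int))) none = [a] := s1
    rw [loop3]
    simp only [e, s3, s2, s1]
    cases ha : PySem.Chars.isdigit a
    · have hs : PySem.Chars.strIsdigit [a] = false := by simp [PySem.Chars.strIsdigit, ha]
      have hc : trailDigits [a] 0 = 0 := by simp [trailDigits, ha]
      simp [hs, hc]
    · have hs : PySem.Chars.strIsdigit [a] = true := by simp [PySem.Chars.strIsdigit, ha]
      have hc : trailDigits [a] 0 = 1 := by simp [trailDigits, ha]
      simp [hs, hc, s1']
  | [a, b] =>
    have e : ([a, b] : List Char).reverse = [b, a] := rfl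
    have s3 : PySem.List.slice ([b, a] : List Char) (some (-((3 : Nat) : Int))) none = [b, a] := by
      rw [PySem.List.slice_from_neg_natCast _ 3 (by norm_num)]; simp
    have s2 : PySem.List.slice ([b, a] : List Char) (some (-((2 : Nat) : Int))) none = [b, a] := by
      rw [PySem.List.slice_from_neg_natCast _ 2 (by norm_num)]; simp
    have s2' : PySem.List.slice ([b, a] : List Char) (some (-(2 : Int))) none = [b, a] := s2
    have s1 : PySem.List.slice ([b, a] : List Char) (some (-((1 : Nat) : Int))) none = [a] := by
      rw [PySem.List.slice_from_neg_natCast _ 1 (by norm_num)]; simp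
    have s1' : PySem.List.slice ([b, a] : List Char) (some (-(1 : Int))) none = [a] := s1
    rw [loop3]
    simp only [e, s3, s2, s1]
    cases ha : PySem.Chars.isdigit a
    · have hs2 : PySem.Chars.strIsdigit [b, a] = false := by simp [PySem.Chars.strIsdigit, ha]
      have hs1 : PySem.Chars.strIsdigit [a] = false := by simp [PySem.Chars.strIsdigit, ha]
      have hc : trailDigits [a, b] 0 = 0 := by simp [trailDigits, ha]
      simp [hs2, hs1, hc]
    · cases hb : PySem.Chars.isdigit b
      · have hs2 : PySem.Chars.strIsdigit [b, a] = false := by simp [PySem.Chars.strIsdigit, hb]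
        have hs1 : PySem.Chars.strIsdigit [a] = true := by simp [PySem.Chars.strIsdigit, ha]
        have hc : trailDigits [a, b] 0 = 1 := by simp [trailDigits, ha, hb]
        simp [hs2, hs1, hc, s1']
      · have hs2 : PySem.Chars.strIsdigit [b, a] = true := by simp [PySem.Chars.strIsdigit, ha, hb]
        have hc : trailDigits [a, b] 0 = 2 := by simp [trailDigits, ha, hb]
        simp [hs2, hc, s2']
  | a :: b :: c :: t =>
    have e : (a :: b :: c :: t).reverse = t.reverse ++ [c, b, a] := by simp
    have h3 : (t.reverse ++ [c, b, a]).drop ((t.reverse ++ [c, b, a]).length - 3) = [c, b, a] := by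
      rw [drop_sub_append _ _ 3 (by simp)]; simp
    have h2 : (t.reverse ++ [c, b, a]).drop ((t.reverse ++ [c, b, a]).length - 2) = [b, a] := by
      rw [drop_sub_append _ _ 2 (by simp)]; simp
    have h1 : (t.reverse ++ [c, b, a]).drop ((t.reverse ++ [c, b, a]).length - 1) = [a] := by
      rw [drop_sub_append _ _ 1 (by simp)]; simp
    have s3 : PySem.List.slice (t.reverse ++ [c, b, a]) (some (-((3 : Nat) : Int))) none = [c, b, a] := by
      rw [PySem.List.slice_from_neg_natCast _ 3 (by norm_num)]; exact h3
    have s3' : PySem.List.slice (t.reverse ++ [c, b, a]) (some (-(3 : Int))) none = [c, b, a] := s3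
    have s2 : PySem.List.slice (t.reverse ++ [c, b, a]) (some (-((2 : Nat) : Int))) none = [b, a] := by
      rw [PySem.List.slice_from_neg_natCast _ 2 (by norm_num)]; exact h2
    have s2' : PySem.List.slice (t.reverse ++ [c, b, a]) (some (-(2 : Int))) none = [b, a] := s2
    have s1 : PySem.List.slice (t.reverse ++ [c, b, a]) (some (-((1 : Nat) : Int))) none = [a] := by
      rw [PySem.List.slice_from_neg_natCast _ 1 (by norm_num)]; exact h1
    have s1' : PySem.List.slice (t.reverse ++ [c, b, a]) (some (-(1 : Int))) none = [a] := s1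
    rw [loop3]
    simp only [e, s3, s2, s1]
    cases ha : PySem.Chars.isdigit a
    · have hs3 : PySem.Chars.strIsdigit [c, b, a] = false := by simp [PySem.Chars.strIsdigit, ha]
      have hs2 : PySem.Chars.strIsdigit [b, a] = false := by simp [PySem.Chars.strIsdigit, ha]
      have hs1 : PySem.Chars.strIsdigit [a] = false := by simp [PySem.Chars.strIsdigit, ha]
      have hc : trailDigits (a :: b :: c :: t) 0 = 0 := by simp [trailDigits, ha]
      simp [hs3, hs2, hs1, hc]
    · cases hb : PySem.Chars.isdigit b
      · have hs3 : PySem.Chars.strIsdigit [c, b, a] = false := by simp [PySem.Chars.strIsdigit, hb]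
        have hs2 : PySem.Chars.strIsdigit [b, a] = false := by simp [PySem.Chars.strIsdigit, hb]
        have hs1 : PySem.Chars.strIsdigit [a] = true := by simp [PySem.Chars.strIsdigit, ha]
        have hc : trailDigits (a :: b :: c :: t) 0 = 1 := by simp [trailDigits, ha, hb]
        simp [hs3, hs2, hs1, hc, s1']
      · cases hc : PySem.Chars.isdigit c
        · have hs3 : PySem.Chars.strIsdigit [c, b, a] = false := by simp [PySem.Chars.strIsdigit, hc]
          have hs2 : PySem.Chars.strIsdigit [b, a] = true := by simp [PySem.Chars.strIsdigit, ha, hb]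
          have hcnt : trailDigits (a :: b :: c :: t) 0 = 2 := by simp [trailDigits, ha, hb, hc]
          simp [hs3, hs2, hcnt, s2']
        · have hs3 : PySem.Chars.strIsdigit [c, b, a] = true := by simp [PySem.Chars.strIsdigit, ha, hb, hc]
          have hcnt : trailDigits (a :: b :: c :: t) 0 = 3 := by simp [trailDigits, ha, hb, hc, trail3]
          simp [hs3, hcnt, s3']

theorem loop_eq_count' (fn : List Char) :
    fileIndexLoop fn 3 =
      (let count := trailDigits fn.reverse 0
       if count > 0 then
         PySem.Int.ofChars? (PySem.List.slice fn (some (-(count : Int))) none)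
       else none) := by
  have h := loop_eq_count fn.reverse
  rw [List.reverse_reverse] at h
  exact h

-- A's two-alternative match on the split result equals B's three-alternative one
theorem match_eq (fn : String) :
    (match PySem.Str.splitMax? fn "_" 1 with
     | some (h :: _) => h
     | _ => fn)
    = (match PySem.Str.splitMax? fn "_" 1 with
       | some (h :: _) => h
       | some [] => fn
       | none => fn) := by
  cases h : PySem.Str.splitMax? fn "_" 1 with
  | none => rfl
  | some l => cases l <;> rfl

-- ===== VERDICT (by name: the statement is the Claim_ definition above) =====
theorem file_index_spec : Claim_equal_file_index := by
  intro fileName _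
  show file_index fileName = file_index_alt fileName
  unfold file_index file_index_alt
  simp only [match_eq]
  exact loop_eq_count' _
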